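-- pv_equiv track=rewrite | github.com/inorganicwriter/MACRO-City-Engine | src/modeling.py | _leakage_safe_feature_columns
-- ===== SOURCE A (Python) =====
-- from typing import Dict, List, Tuple
--
-- def _leakage_safe_feature_columns(target: str, feature_cols: List[str]) -> List[str]:
--     cols = list(dict.fromkeys(feature_cols))
--     target_l = str(target).strip().lower()
--     if target_l == "economic_vitality":
--         cols = [c for c in cols if ("viirs" not in c.lower()) and ("gdp" not in c.lower())]
--     if target_l == "composite_index":
--         cols = [c for c in cols if c not in {"economic_vitality", "livability", "innovation", "composite_index"}]
--     return cols
-- ===== SOURCE B (Python) =====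
-- def _leakage_safe_feature_columns(target, feature_cols):
--     target_l = str(target).strip().lower()
--     if target_l == "economic_vitality":
--         keep = lambda c: ("viirs" not in c.lower()) and ("gdp" not in c.lower())
--     elif target_l == "composite_index":
--         keep = lambda c: c not in ("economic_vitality", "livability", "innovation", "composite_index")
--     else:
--         keep = lambda c: True
--     pending = {}
--     for c in feature_cols:
--         pending[c] = pending.get(c, 0) + 1
--     out = []
--     for c in reversed(feature_cols):
--         pending[c] -= 1
--         if pending[c] == 0 and keep(c):
--             out.append(c)
--     out.reverse()
--     return out
-- ===== Notes on version B (the rewrite author's own statement) =====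
-- stated objective: alternative
-- what changed: Replaces dict.fromkeys dedup followed by staged filter comprehensions with a counting algorithm: count occurrences in one pass, then scan in reverse decrementing counts and emit a column when its pending count hits zero (no earlier copy remains) and it passes a predicate selected once from the target, building the output back-to-front.
import Mathlib
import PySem

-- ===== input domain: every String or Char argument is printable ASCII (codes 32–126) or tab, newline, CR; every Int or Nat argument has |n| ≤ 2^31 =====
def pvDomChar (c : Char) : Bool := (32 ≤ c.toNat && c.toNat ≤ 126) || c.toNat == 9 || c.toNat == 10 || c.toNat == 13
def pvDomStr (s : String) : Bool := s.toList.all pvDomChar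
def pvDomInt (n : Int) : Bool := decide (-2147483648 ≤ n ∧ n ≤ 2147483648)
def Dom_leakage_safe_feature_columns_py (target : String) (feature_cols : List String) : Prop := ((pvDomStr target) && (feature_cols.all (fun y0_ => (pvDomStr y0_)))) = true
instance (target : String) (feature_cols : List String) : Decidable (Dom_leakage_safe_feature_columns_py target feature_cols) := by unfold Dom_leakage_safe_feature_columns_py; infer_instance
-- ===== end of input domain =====

-- B replaces the dict.fromkeys dedup plus staged filter comprehensions by a counting algorithm:
-- count occurrences, then scan in REVERSE emitting a column when its pending count reaches zero
-- (no earlier copy remains) and it passes a predicate selected once from the target; the output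
-- is built back-to-front and reversed. Same result, different mechanism.

-- ===== PORT A =====
-- literal transliteration of A: dedup via dict.fromkeys, then two sequential conditional comprehensions
def leakage_safe_feature_columns_py (target : String) (feature_cols : List String) : List String :=
  let cols := PySem.List.dedup feature_cols
  let target_l := PySem.Str.lower (PySem.Str.strip target)
  let cols := if target_l == "economic_vitality" then
      cols.filter (fun c => !(PySem.Str.isIn "viirs" (PySem.Str.lower c)) && !(PySem.Str.isIn "gdp" (PySem.Str.lower c)))
    else cols
  let cols := if target_l == "composite_index" then
      cols.filter (fun c => !(PySem.Set.contains (PySem.Set.ofList ["economic_vitality", "livability", "innovation", "composite_index"]) c))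
    else cols
  cols

-- ===== PORT B =====
-- the predicate B selects once from the (stripped, lowered) target; membership in a 4-tuple = list contains
def lsfcKeep (target_l : String) (c : String) : Bool :=
  if target_l == "economic_vitality" then
    !(PySem.Str.isIn "viirs" (PySem.Str.lower c)) && !(PySem.Str.isIn "gdp" (PySem.Str.lower c))
  else if target_l == "composite_index" then
    !(["economic_vitality", "livability", "innovation", "composite_index"].contains c)
  else true

-- count occurrences (pending[c] = pending.get(c, 0) + 1), then reverse scan decrementing
-- (pending[c] -= 1: c is always a key here, counted by the first loop, so getD's default is never hit),
-- emit when the pending count hits 0, reverse the back-to-front output at the end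
def leakage_safe_feature_columns_py_alt (target : String) (feature_cols : List String) : List String :=
  let target_l := PySem.Str.lower (PySem.Str.strip target)
  let pending := feature_cols.foldl (fun d c => d.insert c (d.getD c 0 + 1)) PySem.Dict.empty
  let r := feature_cols.reverse.foldl
    (fun (st : PySem.Dict String Int × List String) c =>
      let d := st.1.insert c (st.1.getD c 0 - 1)
      if d.getD c 0 == 0 && lsfcKeep target_l c then (d, st.2 ++ [c]) else (d, st.2))
    (pending, [])
  r.2.reverse

-- ===== PRECONDITION & SPEC =====
def Spec_leakage_safe_feature_columns_py (target : String) (feature_cols : List String) (out : List String) : Prop := out = leakage_safe_feature_columns_py_alt target feature_cols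
instance (target : String) (feature_cols : List String) (out : List String) : Decidable (Spec_leakage_safe_feature_columns_py target feature_cols out) := by unfold Spec_leakage_safe_feature_columns_py; infer_instance

-- ===== CLAIM (what is proved, stated in full; the proofs are below) =====
def Claim_equal_leakage_safe_feature_columns_py : Prop := ∀ (target : String) (feature_cols : List String), Dom_leakage_safe_feature_columns_py target feature_cols → Spec_leakage_safe_feature_columns_py target feature_cols (leakage_safe_feature_columns_py target feature_cols)

-- ===== LEMMAS AND PROOFS =====

-- ordered dedup relative to an already-seen set, as a structural recursion (characterizes A's dedup)
def lsfcDedupRel (xs : List String) (s : PySem.Set String) : List String :=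
  match xs with
  | [] => []
  | x :: xs => if PySem.Set.contains s x then lsfcDedupRel xs s
               else x :: lsfcDedupRel xs (PySem.Set.add s x)

lemma lsfc_foldl_add (xs : List String) (s : PySem.Set String) :
    xs.foldl PySem.Set.add s = s ++ lsfcDedupRel xs s := by
  induction xs generalizing s with
  | nil => simp [lsfcDedupRel]
  | cons x xs ih =>
    simp only [List.foldl_cons, lsfcDedupRel]
    by_cases hm : x ∈ s
    · simp [PySem.Set.add, hm, ih]
    · simp [PySem.Set.add, hm, ih]

lemma lsfc_dedup_eq (xs : List String) :
    PySem.List.dedup xs = lsfcDedupRel xs PySem.Set.empty := by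
  have := lsfc_foldl_add xs PySem.Set.empty
  simpa [PySem.List.dedup_eq_ofList, PySem.Set.ofList_eq_foldl, PySem.Set.empty] using this

-- what B's reverse scan emits (right-to-left order), as a structural recursion
def lsfcEmit (p : String → Bool) (xs : List String) (d : PySem.Dict String Int) : List String :=
  match xs with
  | [] => []
  | x :: t => lsfcEmit p t d ++ (if (d.getD x 0 - t.count x - 1 == 0) && p x then [x] else [])

-- the dict component of B's scan: counts decremented by the occurrences scanned so far
lemma lsfc_scan_getD (p : String → Bool) (xs : List String) (d : PySem.Dict String Int) (out : List String) (c : String) :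
    (xs.foldr
      (fun c (st : PySem.Dict String Int × List String) =>
        if (st.1.insert c (st.1.getD c 0 - 1)).getD c 0 == 0 && p c
        then (st.1.insert c (st.1.getD c 0 - 1), st.2 ++ [c])
        else (st.1.insert c (st.1.getD c 0 - 1), st.2))
      (d, out)).1.getD c 0 = d.getD c 0 - xs.count c := by
  induction xs with
  | nil => simp
  | cons x t ih =>
    rcases hF : (t.foldr
      (fun c (st : PySem.Dict String Int × List String) =>
        if (st.1.insert c (st.1.getD c 0 - 1)).getD c 0 == 0 && p c
        then (st.1.insert c (st.1.getD c 0 - 1), st.2 ++ [c])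
        else (st.1.insert c (st.1.getD c 0 - 1), st.2))
      (d, out)) with ⟨d1, o1⟩
    rw [hF] at ih
    simp only [List.foldr_cons, hF]
    have h1 : ((if (d1.insert x (d1.getD x 0 - 1)).getD x 0 == 0 && p x
        then (d1.insert x (d1.getD x 0 - 1), o1 ++ [x])
        else (d1.insert x (d1.getD x 0 - 1), o1)) :
          PySem.Dict String Int × List String).1 = d1.insert x (d1.getD x 0 - 1) := by
      split <;> rfl
    rw [h1, PySem.Dict.getD_insert]
    by_cases hc : c = x
    · subst hc
      rw [if_pos rfl, ih]
      simp only [List.count_cons_self]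
      push_cast
      ring
    · rw [if_neg hc, ih]
      have hcx : ¬ x = c := fun h => hc h.symm
      have : (x :: t).count c = t.count c := by
        simp [hcx]
      rw [this]

-- the output component of B's scan is out ++ lsfcEmit
lemma lsfc_scan_snd (p : String → Bool) (xs : List String) (d : PySem.Dict String Int) (out : List String) :
    (xs.foldr
      (fun c (st : PySem.Dict String Int × List String) =>
        if (st.1.insert c (st.1.getD c 0 - 1)).getD c 0 == 0 && p c
        then (st.1.insert c (st.1.getD c 0 - 1), st.2 ++ [c])
        else (st.1.insert c (st.1.getD c 0 - 1), st.2))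
      (d, out)).2 = out ++ lsfcEmit p xs d := by
  induction xs with
  | nil => simp [lsfcEmit]
  | cons x t ih =>
    have hd := lsfc_scan_getD p t d out x
    rcases hF : (t.foldr
      (fun c (st : PySem.Dict String Int × List String) =>
        if (st.1.insert c (st.1.getD c 0 - 1)).getD c 0 == 0 && p c
        then (st.1.insert c (st.1.getD c 0 - 1), st.2 ++ [c])
        else (st.1.insert c (st.1.getD c 0 - 1), st.2))
      (d, out)) with ⟨d1, o1⟩
    rw [hF] at ih hd
    simp only at ih hd
    simp only [List.foldr_cons, hF, lsfcEmit]
    have hcnd : (d1.insert x (d1.getD x 0 - 1)).getD x 0 = d.getD x 0 - t.count x - 1 := by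
      rw [PySem.Dict.getD_insert_self, hd]
    by_cases hcond : ((d.getD x 0 - t.count x - 1 == 0) && p x) = true
    · rw [if_pos (by rw [hcnd]; exact hcond)]
      simp only [hcond, if_true, ih, List.append_assoc]
    · rw [if_neg (by rw [hcnd]; exact hcond)]
      simp only [hcond, Bool.false_eq_true, if_false, ih, List.append_nil]

-- the emitted list, reversed, is dedup-relative-to-the-prefix filtered by p,
-- whenever d holds the occurrence counts of the full list pre ++ xs
lemma lsfc_emit_rel (p : String → Bool) (xs : List String) :
    ∀ (pre : List String) (d : PySem.Dict String Int),
      (∀ c, d.getD c 0 = ((pre ++ xs).count c : Int)) →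
      (lsfcEmit p xs d).reverse = (lsfcDedupRel xs (PySem.Set.ofList pre)).filter p := by
  induction xs with
  | nil => intro pre d _; simp [lsfcEmit, lsfcDedupRel]
  | cons x t ih =>
    intro pre d hd
    have hd' : ∀ c, d.getD c 0 = (((pre ++ [x]) ++ t).count c : Int) := by
      intro c; rw [hd c]; simp
    have ihx := ih (pre ++ [x]) d hd'
    have hofl : PySem.Set.ofList (pre ++ [x]) = PySem.Set.add (PySem.Set.ofList pre) x := by
      simp [PySem.Set.ofList_eq_foldl, List.foldl_append]
    have hcnt : d.getD x 0 - t.count x - 1 = (pre.count x : Int) := by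
      rw [hd x]; simp [List.count_append]; ring
    simp only [lsfcEmit, List.reverse_append, lsfcDedupRel]
    by_cases hm : x ∈ pre
    · have hz : (d.getD x 0 - t.count x - 1 == 0) = false := by
        rw [hcnt]
        have : pre.count x ≠ 0 := by simp [List.count_eq_zero, hm]
        simp only [beq_eq_false_iff_ne, ne_eq, Int.natCast_eq_zero]
        exact this
      have hadd : PySem.Set.add (PySem.Set.ofList pre) x = PySem.Set.ofList pre := by
        simp [PySem.Set.add, hm]
      rw [hofl, hadd] at ihx
      simp [hz, hm, ihx]
    · have hz : (d.getD x 0 - t.count x - 1 == 0) = true := by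
        rw [hcnt]
        simp [List.count_eq_zero, hm]
      rw [hofl] at ihx
      by_cases hp : p x = true
      · simp [hz, hp, hm, ihx]
      · simp only [Bool.not_eq_true] at hp
        simp [hz, hp, hm, ihx]

-- the counting loop produces exactly the occurrence counts
lemma lsfc_pending (xs : List String) (c : String) :
    (xs.foldl (fun d c => d.insert c (d.getD c 0 + 1)) PySem.Dict.empty).getD c 0
      = (xs.count c : Int) := by
  rw [PySem.Dict.foldl_insert_getD_add_one_eq_counter, PySem.Dict.getD_counter]

theorem lsfc_main (target : String) (feature_cols : List String) :
    leakage_safe_feature_columns_py target feature_cols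
      = leakage_safe_feature_columns_py_alt target feature_cols := by
  unfold leakage_safe_feature_columns_py leakage_safe_feature_columns_py_alt
  set tl := PySem.Str.lower (PySem.Str.strip target) with htl
  simp only [List.foldl_reverse]
  simp only [lsfc_scan_snd (lsfcKeep tl) feature_cols _ [], List.nil_append]
  rw [lsfc_emit_rel (lsfcKeep tl) feature_cols [] _ (by
        intro c; simpa using lsfc_pending feature_cols c)]
  rw [lsfc_dedup_eq]
  have hempty : PySem.Set.ofList ([] : List String) = PySem.Set.empty := rfl
  rw [hempty]
  by_cases h1 : tl == "economic_vitality"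
  · have h2 : (tl == "composite_index") = false := by
      have : tl = "economic_vitality" := by simpa using h1
      simp [this]
    have hp : lsfcKeep tl = fun c => !(PySem.Str.isIn "viirs" (PySem.Str.lower c)) && !(PySem.Str.isIn "gdp" (PySem.Str.lower c)) := by
      funext c; simp [lsfcKeep, h1]
    simp only [h1, h2, if_true, Bool.false_eq_true, if_false, hp]
  · simp only [Bool.not_eq_true] at h1
    by_cases h2 : tl == "composite_index"
    · have hp : lsfcKeep tl = fun c => !(PySem.Set.contains (PySem.Set.ofList ["economic_vitality", "livability", "innovation", "composite_index"]) c) := by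
        funext c
        have hcc : PySem.Set.contains (PySem.Set.ofList ["economic_vitality", "livability", "innovation", "composite_index"]) c
            = (["economic_vitality", "livability", "innovation", "composite_index"].contains c) := by
          by_cases hcm : c ∈ (["economic_vitality", "livability", "innovation", "composite_index"] : List String) <;>
            simp [hcm]
        simp only [lsfcKeep, h1, h2, if_true, hcc]
        simp
      simp only [h1, h2, if_true, Bool.false_eq_true, if_false, hp]
    · simp only [Bool.not_eq_true] at h2
      have hp : lsfcKeep tl = fun _ => true := by
        funext c; simp [lsfcKeep, h1, h2]
      simp only [h1, h2, Bool.false_eq_true, if_false, hp]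
      simp

-- ===== VERDICT (by name: the statement is the Claim_ definition above) =====
theorem leakage_safe_feature_columns_py_spec : Claim_equal_leakage_safe_feature_columns_py := by
  intro target feature_cols _
  exact lsfc_main target feature_cols
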